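-- pv_equiv track=rewrite | github.com/quarantin/imperial-probe-droid | cmd/meta.py | opts_meta
-- ===== SOURCE A (Python) =====
-- opts = {
-- 	'a':             'arena',
-- 	'arena':         'arena',
-- 	'f':             'fleet',
-- 	'fleet':         'fleet',
-- 	'l':             'leader',
-- 	'leader':        'leader',
-- 	'c':             'commander',
-- 	'commander':     'commander',
-- 	'C':             'compact',
-- 	'compact':       'compact',
-- 	'r':             'reinforcement',
-- 	'reinforcement': 'reinforcement',
--
-- }
--
-- def opts_meta(args):
--
-- 	top_n = 5
-- 	selected_opts = []
-- 	args_cpy = list(args)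
--
-- 	for arg in args_cpy:
--
-- 		if arg in opts:
-- 			opt = opts[arg]
-- 			args.remove(arg)
-- 			selected_opts.append(opt)
--
-- 		elif arg.isdigit():
-- 			args.remove(arg)
-- 			arg = int(arg)
-- 			if arg < 1:
-- 				arg = 1
-- 			if arg > 50:
-- 				arg = 50
--
-- 			top_n = int(arg)
--
-- 	return args, selected_opts, top_n
-- ===== SOURCE B (Python) =====
-- opts = {
-- 	'a':             'arena',
-- 	'arena':         'arena',
-- 	'f':             'fleet',
-- 	'fleet':         'fleet',
-- 	'l':             'leader',
-- 	'leader':        'leader',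
-- 	'c':             'commander',
-- 	'commander':     'commander',
-- 	'C':             'compact',
-- 	'compact':       'compact',
-- 	'r':             'reinforcement',
-- 	'reinforcement': 'reinforcement',
-- }
--
-- def opts_meta(args):
-- 	selected_opts = [opts[a] for a in args if a in opts]
-- 	top_n = 5
-- 	for d in (a for a in args if a.isdigit()):
-- 		top_n = min(max(int(d), 1), 50)
-- 	args[:] = [a for a in args if a not in opts and not a.isdigit()]
-- 	return args, selected_opts, top_n
-- ===== Notes on version B (the rewrite author's own statement) =====
-- stated objective: faster
-- what changed: A's single stateful loop that branches and mutates args with remove() per element is decomposed into three independent linear passes: a comprehension collecting the selected option values, a pass over the digit-valued args keeping the last clamped value as top_n, and one filtering rewrite of args in place.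
import Mathlib
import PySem

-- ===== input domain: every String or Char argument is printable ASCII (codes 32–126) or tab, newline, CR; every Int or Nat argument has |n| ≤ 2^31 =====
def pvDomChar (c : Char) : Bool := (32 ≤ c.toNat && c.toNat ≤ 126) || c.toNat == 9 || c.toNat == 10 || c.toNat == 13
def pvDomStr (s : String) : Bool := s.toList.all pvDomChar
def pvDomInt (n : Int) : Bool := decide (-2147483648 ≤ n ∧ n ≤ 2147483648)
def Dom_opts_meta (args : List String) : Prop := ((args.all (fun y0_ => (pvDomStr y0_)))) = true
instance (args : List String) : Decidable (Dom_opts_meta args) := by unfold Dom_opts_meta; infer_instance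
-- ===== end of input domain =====

-- B replaces A's single stateful remove-and-branch loop by independent passes
-- (one comprehension per result component), avoiding the quadratic list.remove; A mutates `args`
-- in place; B performs the same in-place rewrite, and the theorem is about the
-- returned triple.

-- ===== PORT A =====

-- the module-level `opts` dict
def pvOpts : PySem.Dict String String := PySem.Dict.mk
  [("a","arena"),("arena","arena"),("f","fleet"),("fleet","fleet"),
   ("l","leader"),("leader","leader"),("c","commander"),("commander","commander"),
   ("C","compact"),("compact","compact"),("r","reinforcement"),("reinforcement","reinforcement")]

-- one iteration of A's `for arg in args_cpy` loop; state = (args, selected_opts, top_n)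
def pvStepA (st : List String × List String × Int) (arg : String) : List String × List String × Int :=
  if pvOpts.contains arg then
    let opt := (pvOpts.get? arg).getD ""          -- arg ∈ opts, so get? is some
    ((PySem.List.remove? st.1 arg).getD st.1,      -- args.remove(arg); arg is in the list, so remove? is some
     st.2.1 ++ [opt], st.2.2)
  else if PySem.Str.strIsdigit arg then
    let n := (PySem.Int.ofStr? arg).getD 0        -- int(arg); a nonempty ASCII digit string always parses
    let n1 := if n < 1 then (1 : Int) else n
    let n2 := if n1 > 50 then (50 : Int) else n1
    ((PySem.List.remove? st.1 arg).getD st.1, st.2.1, n2)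
  else st

def opts_meta (args : List String) : List String × List String × Int :=
  (args.foldl pvStepA (args, [], 5))

-- ===== PORT B =====

def opts_meta_alt (args : List String) : List String × List String × Int :=
  let selected_opts := args.filterMap (fun a => pvOpts.get? a)
  let top_n := (args.filter (fun a => PySem.Str.strIsdigit a)).foldl
      (fun _ d => min (max ((PySem.Int.ofStr? d).getD 0) 1) 50) (5 : Int)
  let rest := args.filter (fun a => !pvOpts.contains a && !PySem.Str.strIsdigit a)
  (rest, selected_opts, top_n)

-- ===== PRECONDITION & SPEC =====
def Spec_opts_meta (args : List String) (out : List String × List String × Int) : Prop := out = opts_meta_alt args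
instance (args : List String) (out : List String × List String × Int) : Decidable (Spec_opts_meta args out) := by unfold Spec_opts_meta; infer_instance

-- ===== CLAIM (what is proved, stated in full; the proofs are below) =====
def Claim_equal_opts_meta : Prop := ∀ (args : List String), Dom_opts_meta args → Spec_opts_meta args (opts_meta args)

-- ===== LEMMAS AND PROOFS =====

-- no key of `opts` is a digit string
theorem pvOpts_not_digit (a : String) (h : pvOpts.contains a = true) :
    PySem.Chars.strIsdigit a.toList = false := by
  simp only [pvOpts, PySem.Dict.contains_mk] at h
  simp only [List.any_cons, List.any_nil, Bool.or_eq_true, beq_iff_eq] at h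
  rcases h with h|h|h|h|h|h|h|h|h|h|h|h|h
  all_goals first
    | (subst h; decide)
    | exact absurd h (by simp)

theorem pv_fold_if_filter (p : String → Bool) (f : String → Int) :
    ∀ (l : List String) (t : Int),
      l.foldl (fun t a => if p a then f a else t) t
        = (l.filter p).foldl (fun _ a => f a) t := by
  intro l
  induction l with
  | nil => intro t; rfl
  | cons a l ih =>
    intro t
    by_cases h : p a <;> simp [h, ih]

-- the loop invariant of A's fold: the already-processed, kept prefix `pre` stays,
-- and each component is the corresponding pass of B over the remaining suffix
theorem pv_loopA (s : List String) :
    ∀ (pre sel : List String) (tn : Int),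
      (∀ x ∈ pre, pvOpts.contains x = false ∧ PySem.Chars.strIsdigit x.toList = false) →
      s.foldl pvStepA (pre ++ s, sel, tn)
        = (pre ++ s.filter (fun a => !pvOpts.contains a && !PySem.Str.strIsdigit a),
           sel ++ s.filterMap (fun a => pvOpts.get? a),
           s.foldl (fun t a =>
               if !pvOpts.contains a && PySem.Str.strIsdigit a then
                 min (max ((PySem.Int.ofStr? a).getD 0) 1) 50 else t) tn) := by
  induction s with
  | nil => intro pre sel tn _; simp
  | cons a s ih =>
    intro pre sel tn hpre
    simp only [List.foldl_cons]
    by_cases hc : pvOpts.contains a = true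
    · -- option branch: removes a, appends its value
      have hnot : a ∉ pre := fun hm => by
        have := (hpre a hm).1; rw [this] at hc; exact Bool.false_ne_true hc
      have hrm : PySem.List.remove? (pre ++ a :: s) a = some (pre ++ s) := by
        rw [PySem.List.remove?_eq_some_erase _ _ (by simp)]
        rw [List.erase_append_right _ hnot, List.erase_cons_head]
      have hsome : (pvOpts.get? a).isSome := by
        rw [← PySem.Dict.contains_eq_isSome_get?]; exact hc
      obtain ⟨v, hv⟩ := Option.isSome_iff_exists.mp hsome
      have hd := pvOpts_not_digit a hc
      simp only [pvStepA, hc, if_true, hrm, hv, Option.getD_some]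
      rw [ih pre (sel ++ [v]) tn hpre]
      simp [hc, hd, hv]
    · have hc' : pvOpts.contains a = false := by simpa using hc
      have hget : pvOpts.get? a = none := by
        rw [PySem.Dict.get?_eq_none_iff_contains]; exact hc'
      by_cases hdg : PySem.Chars.strIsdigit a.toList = true
      · -- digit branch: removes a, updates top_n
        have hnot : a ∉ pre := fun hm => by
          have := (hpre a hm).2; rw [this] at hdg; exact Bool.false_ne_true hdg
        have hrm : PySem.List.remove? (pre ++ a :: s) a = some (pre ++ s) := by
          rw [PySem.List.remove?_eq_some_erase _ _ (by simp)]
          rw [List.erase_append_right _ hnot, List.erase_cons_head]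
        have hclamp : ∀ n : Int,
            (if (if n < 1 then (1:Int) else n) > 50 then (50:Int)
             else (if n < 1 then (1:Int) else n))
            = min (max n 1) 50 := by
          intro n; split_ifs <;> omega
        simp only [pvStepA, hc', PySem.Str.strIsdigit, hdg, hrm, Option.getD_some,
          Bool.false_eq_true, if_false, if_true]
        rw [ih pre sel _ hpre]
        simp [hget, hc', hdg, hclamp]
      · -- kept: a moves into the prefix
        have hdg' : PySem.Chars.strIsdigit a.toList = false := by simpa using hdg
        have hstep : pvStepA (pre ++ a :: s, sel, tn) a = ((pre ++ [a]) ++ s, sel, tn) := by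
          simp [pvStepA, hc', PySem.Str.strIsdigit, hdg']
        rw [hstep, ih (pre ++ [a]) sel tn ?_]
        · simp [hget, hc', hdg']
        · intro x hx
          rcases List.mem_append.mp hx with h | h
          · exact hpre x h
          · simp only [List.mem_singleton] at h
            subst h
            exact ⟨hc', hdg'⟩

-- ===== VERDICT (by name: the statement is the Claim_ definition above) =====
theorem opts_meta_spec : Claim_equal_opts_meta := by
  intro args _
  unfold Spec_opts_meta opts_meta opts_meta_alt
  have h := pv_loopA args [] [] 5 (by simp)
  simp only [List.nil_append] at h
  rw [h]
  refine Prod.ext rfl (Prod.ext rfl ?_)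
  simp only
  rw [pv_fold_if_filter (fun a => !pvOpts.contains a && PySem.Str.strIsdigit a)
        (fun a => min (max ((PySem.Int.ofStr? a).getD 0) 1) 50) args 5]
  congr 1
  apply List.filter_congr
  intro x _
  by_cases hc : pvOpts.contains x = true
  · simp [hc, pvOpts_not_digit x hc]
  · simp only [Bool.not_eq_true] at hc
    simp [hc]
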